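-- pv_equiv track=rewrite | github.com/surajpandey111/smart-cook-ai | utils/rules.py | violates_diet
-- ===== SOURCE A (Python) =====
-- from typing import List, Dict, Tuple, Set
--
-- ANIMAL_PRODUCTS = {"chicken","meat","fish","egg","eggs","paneer","yogurt","milk","ghee","butter"}
--
-- def violates_diet(ingredients: List[str], diet: str) -> bool:
--     items = set(map(str.lower, ingredients))
--     if diet == "vegan":
--         return any(x in items for x in ANIMAL_PRODUCTS if x not in {"milk","yogurt","butter","ghee"}) or "paneer" in items or "eggs" in items
--     if diet == "vegetarian":
--         return any(x in items for x in {"chicken","meat","fish"})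
--     if diet == "eggetarian":
--         return any(x in items for x in {"chicken","meat","fish"})
--     return False  # non-veg
-- ===== SOURCE B (Python) =====
-- def violates_diet(ingredients, diet):
--     if diet not in ("vegan", "vegetarian", "eggetarian"):
--         return False
--     vegan = diet == "vegan"
--     for ing in ingredients:
--         x = ing.lower()
--         if x in ("chicken", "meat", "fish"):
--             return True
--         if vegan and x in ("egg", "eggs", "paneer"):
--             return True
--     return False
-- ===== Notes on version B (the rewrite author's own statement) =====
-- stated objective: alternative
-- what changed: Instead of materialising a lowercase set of the ingredients and then testing forbidden items against it per diet branch, B makes a single early-exit scan over the ingredient list, classifying each lowered ingredient directly (flesh items always forbidden, egg/eggs/paneer additionally for vegan); no set is built.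
import Mathlib
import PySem

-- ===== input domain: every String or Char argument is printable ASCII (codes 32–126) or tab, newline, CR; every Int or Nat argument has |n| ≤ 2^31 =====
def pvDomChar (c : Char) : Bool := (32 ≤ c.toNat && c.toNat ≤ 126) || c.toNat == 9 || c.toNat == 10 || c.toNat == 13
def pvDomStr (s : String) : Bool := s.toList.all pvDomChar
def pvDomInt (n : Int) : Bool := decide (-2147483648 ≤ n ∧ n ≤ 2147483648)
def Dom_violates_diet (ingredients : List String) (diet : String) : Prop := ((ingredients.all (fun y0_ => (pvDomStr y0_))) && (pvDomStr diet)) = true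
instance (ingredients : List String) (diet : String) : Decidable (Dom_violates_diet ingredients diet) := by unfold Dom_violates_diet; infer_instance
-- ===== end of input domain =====

-- B replaces A's build-a-set-then-test-forbidden-items-per-branch logic by a single
-- early-exit scan over the ingredient list classifying each item directly (objective: alternative).

-- ===== PORT A =====
-- module constant ANIMAL_PRODUCTS (a Python set literal)
def ANIMAL_PRODUCTS : PySem.Set String :=
  PySem.Set.ofList ["chicken","meat","fish","egg","eggs","paneer","yogurt","milk","ghee","butter"]

def violates_diet (ingredients : List String) (diet : String) : Bool :=
  let items : PySem.Set String := PySem.Set.ofList (ingredients.map PySem.Str.lower)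
  if diet = "vegan" then
    ((ANIMAL_PRODUCTS.filter
        (fun x => !(PySem.Set.contains (PySem.Set.ofList ["milk","yogurt","butter","ghee"]) x))).any
      (fun x => PySem.Set.contains items x))
      || PySem.Set.contains items "paneer" || PySem.Set.contains items "eggs"
  else if diet = "vegetarian" then
    (PySem.Set.ofList ["chicken","meat","fish"]).any (fun x => PySem.Set.contains items x)
  else if diet = "eggetarian" then
    (PySem.Set.ofList ["chicken","meat","fish"]).any (fun x => PySem.Set.contains items x)
  else
    false

-- ===== PORT B =====
-- the for-loop over ingredients with early return, as structural recursion
def vdLoop (vegan : Bool) : List String → Bool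
  | [] => false
  | ing :: rest =>
    let x := PySem.Str.lower ing
    if x = "chicken" || x = "meat" || x = "fish" then true
    else if vegan && (x = "egg" || x = "eggs" || x = "paneer") then true
    else vdLoop vegan rest

def violates_diet_alt (ingredients : List String) (diet : String) : Bool :=
  if !(diet = "vegan" || diet = "vegetarian" || diet = "eggetarian") then false
  else vdLoop (diet = "vegan") ingredients

-- ===== PRECONDITION & SPEC =====
def Spec_violates_diet (ingredients : List String) (diet : String) (out : Bool) : Prop := out = violates_diet_alt ingredients diet
instance (ingredients : List String) (diet : String) (out : Bool) : Decidable (Spec_violates_diet ingredients diet out) := by unfold Spec_violates_diet; infer_instance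

-- ===== CLAIM (what is proved, stated in full; the proofs are below) =====
def Claim_equal_violates_diet : Prop := ∀ (ingredients : List String) (diet : String), Dom_violates_diet ingredients diet → Spec_violates_diet ingredients diet (violates_diet ingredients diet)

-- ===== LEMMAS AND PROOFS =====

-- the per-ingredient test B's loop applies, as a standalone predicate
def vdPred (vegan : Bool) (ing : String) : Bool :=
  (PySem.Str.lower ing = "chicken" || PySem.Str.lower ing = "meat" || PySem.Str.lower ing = "fish")
  || vegan && (PySem.Str.lower ing = "egg" || PySem.Str.lower ing = "eggs" || PySem.Str.lower ing = "paneer")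

-- the early-exit loop equals List.any of that predicate
theorem vdLoop_eq_any (vegan : Bool) (l : List String) :
    vdLoop vegan l = l.any (vdPred vegan) := by
  induction l with
  | nil => rfl
  | cons a rest ih =>
    simp only [vdLoop, List.any_cons, ih, vdPred]
    cases hb1 : (PySem.Str.lower a = "chicken" || PySem.Str.lower a = "meat" || PySem.Str.lower a = "fish")
    · cases hb2 : (vegan && (PySem.Str.lower a = "egg" || PySem.Str.lower a = "eggs" || PySem.Str.lower a = "paneer"))
      · simp
      · simp
    · simp

theorem vdPred_true_iff (ing : String) :
    vdPred true ing = true ↔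
      (PySem.Str.lower ing = "chicken" ∨ PySem.Str.lower ing = "meat" ∨ PySem.Str.lower ing = "fish"
       ∨ PySem.Str.lower ing = "egg" ∨ PySem.Str.lower ing = "eggs" ∨ PySem.Str.lower ing = "paneer") := by
  simp only [vdPred, Bool.true_and, Bool.or_eq_true, decide_eq_true_eq, or_assoc]

theorem vdPred_false_iff (ing : String) :
    vdPred false ing = true ↔
      (PySem.Str.lower ing = "chicken" ∨ PySem.Str.lower ing = "meat" ∨ PySem.Str.lower ing = "fish") := by
  simp only [vdPred, Bool.false_and, Bool.or_false, Bool.or_eq_true, decide_eq_true_eq, or_assoc]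

-- A's "x in items" unfolded to membership in the lowered list
theorem contains_items (ings : List String) (x : String) :
    PySem.Set.contains (PySem.Set.ofList (ings.map PySem.Str.lower)) x = true
      ↔ ∃ ing ∈ ings, PySem.Str.lower ing = x := by
  simp [PySem.Set.contains, PySem.Set.mem_ofList, List.contains_iff_mem, eq_comm]

theorem filter_animal_products :
    (ANIMAL_PRODUCTS.filter
      (fun x => !(PySem.Set.contains (PySem.Set.ofList ["milk","yogurt","butter","ghee"]) x)))
    = ["chicken","meat","fish","egg","eggs","paneer"] := by decide

theorem ofList_cmf :
    PySem.Set.ofList ["chicken","meat","fish"] = ["chicken","meat","fish"] := by decide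

-- the vegetarian/eggetarian scan of A equals B's loop with vegan = false
theorem veg_case (ings : List String) :
    ((PySem.Set.ofList ["chicken","meat","fish"]).any
      (fun x => PySem.Set.contains (PySem.Set.ofList (ings.map PySem.Str.lower)) x))
    = vdLoop false ings := by
  rw [ofList_cmf, vdLoop_eq_any, Bool.eq_iff_iff]
  simp only [List.any_eq_true, contains_items, vdPred_false_iff,
             List.mem_cons, List.not_mem_nil, or_false]
  constructor
  · rintro ⟨x, hx, ing, hm, hl⟩
    refine ⟨ing, hm, ?_⟩
    rcases hx with rfl | rfl | rfl
    · exact Or.inl hl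
    · exact Or.inr (Or.inl hl)
    · exact Or.inr (Or.inr hl)
  · rintro ⟨ing, hm, h | h | h⟩
    · exact ⟨"chicken", by simp, ing, hm, h⟩
    · exact ⟨"meat", by simp, ing, hm, h⟩
    · exact ⟨"fish", by simp, ing, hm, h⟩

-- ===== VERDICT (by name: the statement is the Claim_ definition above) =====
theorem violates_diet_spec : Claim_equal_violates_diet := by
  intro ings diet _
  unfold Spec_violates_diet violates_diet violates_diet_alt
  by_cases h1 : diet = "vegan"
  · subst h1
    simp only [String.reduceEq, decide_true, decide_false, Bool.true_or, Bool.or_true,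
               Bool.not_true, reduceIte, if_true]
    rw [filter_animal_products, vdLoop_eq_any, Bool.eq_iff_iff]
    simp only [Bool.false_eq_true, if_false, Bool.or_eq_true, List.any_eq_true, contains_items,
               vdPred_true_iff, List.mem_cons, List.not_mem_nil, or_false]
    constructor
    · rintro ((⟨x, hx, ing, hm, hl⟩ | ⟨ing, hm, hl⟩) | ⟨ing, hm, hl⟩)
      · refine ⟨ing, hm, ?_⟩
        rcases hx with rfl | rfl | rfl | rfl | rfl | rfl
        · exact Or.inl hl
        · exact Or.inr (Or.inl hl)
        · exact Or.inr (Or.inr (Or.inl hl))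
        · exact Or.inr (Or.inr (Or.inr (Or.inl hl)))
        · exact Or.inr (Or.inr (Or.inr (Or.inr (Or.inl hl))))
        · exact Or.inr (Or.inr (Or.inr (Or.inr (Or.inr hl))))
      · exact ⟨ing, hm, Or.inr (Or.inr (Or.inr (Or.inr (Or.inr hl))))⟩
      · exact ⟨ing, hm, Or.inr (Or.inr (Or.inr (Or.inr (Or.inl hl))))⟩
    · rintro ⟨ing, hm, h | h | h | h | h | h⟩
      · exact Or.inl (Or.inl ⟨"chicken", by simp, ing, hm, h⟩)
      · exact Or.inl (Or.inl ⟨"meat", by simp, ing, hm, h⟩)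
      · exact Or.inl (Or.inl ⟨"fish", by simp, ing, hm, h⟩)
      · exact Or.inl (Or.inl ⟨"egg", by simp, ing, hm, h⟩)
      · exact Or.inr ⟨ing, hm, h⟩
      · exact Or.inl (Or.inr ⟨ing, hm, h⟩)
  · by_cases h2 : diet = "vegetarian"
    · subst h2
      simp only [if_neg h1, String.reduceEq, decide_true, decide_false, Bool.false_or,
                 Bool.or_true, Bool.not_true, reduceIte, if_true, Bool.false_eq_true, if_false]
      exact veg_case ings
    · by_cases h3 : diet = "eggetarian"
      · subst h3
        simp only [if_neg h1, if_neg h2, String.reduceEq, decide_true, decide_false,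
                   Bool.false_or, Bool.or_true, Bool.not_true, reduceIte, if_true,
                   Bool.false_eq_true, if_false]
        exact veg_case ings
      · simp [h1, h2, h3]
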